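-- pv_equiv track=rewrite | github.com/JotaP3h/meditranscriber-mvp | meditranscriber_mvp/role_classifier.py | label_speaker_roles
-- ===== SOURCE A (Python) =====
-- from typing import Dict, List
--
-- MEDICO_CUES = {
--     "prescrever", "prescrição", "dosagem", "posologia", "exame", "solicitar exame",
--     "encaminhamento", "hipótese", "diagnóstico", "diagnosticar", "tratamento",
--     "conduta", "retorno", "anamnese", "antibiótico", "anti-inflamatório",
--     "resultado", "laudo", "radiografia", "ressonância", "tomografia",
--     "pressão", "saturação", "frequência cardíaca", "medicação", "atestado"
-- }
--
-- PACIENTE_CUES = {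
--     "dor", "doendo", "sinto", "tô", "estou", "febre", "enjoo", "náusea", "cansaço",
--     "minha", "meu", "minhas", "meus", "acho", "penso", "medo", "preocupado",
--     "melhorou", "piorou", "não consigo", "não aguento"
-- }
--
-- def score_text(text: str, cues: set) -> int:
--     t = text.lower()
--     return sum(1 for c in cues if c in t)
--
-- def label_speaker_roles(segments: List[dict]) -> Dict[str, str]:
--     per_spk = {}
--     for s in segments:
--         spk = s.get("speaker", "UNKNOWN")
--         txt = s.get("text", "")
--         m = score_text(txt, MEDICO_CUES)
--         p = score_text(txt, PACIENTE_CUES)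
--         q = 1 if txt.endswith("?") else 0
--         per_spk.setdefault(spk, {"m": 0, "p": 0, "q": 0})
--         per_spk[spk]["m"] += m
--         per_spk[spk]["p"] += p
--         per_spk[spk]["q"] += q
--
--     mapping = {}
--     sorted_spk = sorted(per_spk.items(), key=lambda kv: ((kv[1]["m"] - kv[1]["p"]), kv[1]["q"]), reverse=True)
--     if sorted_spk:
--         mapping[sorted_spk[0][0]] = "Médico"
--     for spk, _ in per_spk.items():
--         mapping.setdefault(spk, "Paciente")
--     return mapping
-- ===== SOURCE B (Python) =====
-- from typing import Dict, List
--
-- MEDICO_CUES = {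
--     "prescrever", "prescrição", "dosagem", "posologia", "exame", "solicitar exame",
--     "encaminhamento", "hipótese", "diagnóstico", "diagnosticar", "tratamento",
--     "conduta", "retorno", "anamnese", "antibiótico", "anti-inflamatório",
--     "resultado", "laudo", "radiografia", "ressonância", "tomografia",
--     "pressão", "saturação", "frequência cardíaca", "medicação", "atestado"
-- }
--
-- PACIENTE_CUES = {
--     "dor", "doendo", "sinto", "tô", "estou", "febre", "enjoo", "náusea", "cansaço",
--     "minha", "meu", "minhas", "meus", "acho", "penso", "medo", "preocupado",
--     "melhorou", "piorou", "não consigo", "não aguento"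
-- }
--
-- def score_text(text: str, cues: set) -> int:
--     t = text.lower()
--     return sum(1 for c in cues if c in t)
--
-- def label_speaker_roles(segments: List[dict]) -> Dict[str, str]:
--     # One flat dict speaker -> (m, p, q) tuple, then a linear arg-max
--     # instead of building nested dicts and sorting all speakers.
--     scores = {}
--     for s in segments:
--         spk = s.get("speaker", "UNKNOWN")
--         txt = s.get("text", "")
--         m0, p0, q0 = scores.get(spk, (0, 0, 0))
--         scores[spk] = (m0 + score_text(txt, MEDICO_CUES),
--                        p0 + score_text(txt, PACIENTE_CUES),
--                        q0 + (1 if txt.endswith("?") else 0))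
--     top = max(scores.items(), key=lambda kv: (kv[1][0] - kv[1][1], kv[1][2]), default=None)
--     if top is None:
--         return {}
--     best = top[0]
--     return {best: "Médico", **{spk: "Paciente" for spk in scores if spk != best}}
-- ===== Notes on version B (the rewrite author's own statement) =====
-- stated objective: simpler
-- what changed: B aggregates per-speaker counts into one flat dict of (m,p,q) triples instead of nested per-key dicts and picks the top speaker with a single linear max(..., key=...) arg-max instead of fully sorting all speakers and taking the first element.
import Mathlib
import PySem

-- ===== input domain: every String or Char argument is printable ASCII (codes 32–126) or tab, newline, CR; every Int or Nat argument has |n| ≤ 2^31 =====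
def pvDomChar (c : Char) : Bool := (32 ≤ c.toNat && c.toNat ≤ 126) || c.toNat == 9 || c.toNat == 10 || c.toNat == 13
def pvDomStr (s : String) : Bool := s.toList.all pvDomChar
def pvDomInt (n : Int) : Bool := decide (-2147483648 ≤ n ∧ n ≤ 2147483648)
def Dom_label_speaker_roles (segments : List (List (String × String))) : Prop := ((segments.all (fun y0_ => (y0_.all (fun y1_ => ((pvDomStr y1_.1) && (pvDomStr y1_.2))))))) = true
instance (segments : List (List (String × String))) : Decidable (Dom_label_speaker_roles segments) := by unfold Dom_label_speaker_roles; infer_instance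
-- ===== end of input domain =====

-- B keeps the per-speaker counts in one flat dict of (m,p,q) triples and picks the top
-- speaker by a single linear arg-max instead of nested dicts plus a full sort (objective: simpler).

-- ===== PORT A =====
-- module constants (Python sets of cue strings; only counted over, order irrelevant)
def pvMedicoCues : List String :=
  ["prescrever", "prescrição", "dosagem", "posologia", "exame", "solicitar exame",
   "encaminhamento", "hipótese", "diagnóstico", "diagnosticar", "tratamento",
   "conduta", "retorno", "anamnese", "antibiótico", "anti-inflamatório",
   "resultado", "laudo", "radiografia", "ressonância", "tomografia",
   "pressão", "saturação", "frequência cardíaca", "medicação", "atestado"]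

def pvPacienteCues : List String :=
  ["dor", "doendo", "sinto", "tô", "estou", "febre", "enjoo", "náusea", "cansaço",
   "minha", "meu", "minhas", "meus", "acho", "penso", "medo", "preocupado",
   "melhorou", "piorou", "não consigo", "não aguento"]

-- score_text: sum(1 for c in cues if c in t) over t = text.lower()
def pvScoreText (text : String) (cues : List String) : Int :=
  let t := PySem.Str.lower text
  ((cues.countP (fun c => PySem.Str.isIn c t) : Nat) : Int)

def pvInner0 : PySem.Dict String Int := PySem.Dict.ofList [("m", 0), ("p", 0), ("q", 0)]

-- body of A's aggregation loop (per_spk.setdefault …; then the three '+=' updates)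
def pvStepA (d : PySem.Dict String (PySem.Dict String Int)) (s : List (String × String)) :
    PySem.Dict String (PySem.Dict String Int) :=
  let spk := (PySem.Dict.mk s).getD "speaker" "UNKNOWN"
  let txt := (PySem.Dict.mk s).getD "text" ""
  let m := pvScoreText txt pvMedicoCues
  let p := pvScoreText txt pvPacienteCues
  let q : Int := if PySem.Str.endswith txt "?" then 1 else 0
  let d := d.setdefault spk (PySem.Dict.ofList [("m", 0), ("p", 0), ("q", 0)])
  let d := d.modify spk pvInner0 (fun r => r.modify "m" 0 (· + m))
  let d := d.modify spk pvInner0 (fun r => r.modify "p" 0 (· + p))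
  d.modify spk pvInner0 (fun r => r.modify "q" 0 (· + q))

def label_speaker_roles (segments : List (List (String × String))) : List (String × String) :=
  let per_spk := segments.foldl pvStepA PySem.Dict.empty
  let sorted_spk := PySem.List.sorted2 per_spk.items
    (fun kv => kv.2.getD "m" 0 - kv.2.getD "p" 0) (fun kv => kv.2.getD "q" 0) true
  let mapping : PySem.Dict String String :=
    match sorted_spk.head? with
    | some kv => PySem.Dict.empty.insert kv.1 "Médico"
    | none => PySem.Dict.empty
  let mapping := per_spk.items.foldl (fun mp kv => mp.setdefault kv.1 "Paciente") mapping
  mapping.items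

-- ===== PORT B =====
-- body of B's aggregation loop (scores[spk] = triple-sum of scores.get(spk,(0,0,0)))
def pvStepB (d : PySem.Dict String (Int × Int × Int)) (s : List (String × String)) :
    PySem.Dict String (Int × Int × Int) :=
  let spk := (PySem.Dict.mk s).getD "speaker" "UNKNOWN"
  let txt := (PySem.Dict.mk s).getD "text" ""
  d.modify spk (0, 0, 0) (fun t =>
    (t.1 + pvScoreText txt pvMedicoCues,
     t.2.1 + pvScoreText txt pvPacienteCues,
     t.2.2 + (if PySem.Str.endswith txt "?" then 1 else 0)))

def label_speaker_roles_alt (segments : List (List (String × String))) : List (String × String) :=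
  let scores := segments.foldl pvStepB PySem.Dict.empty
  match PySem.List.max2? scores.items (fun kv => kv.2.1 - kv.2.2.1) (fun kv => kv.2.2.2) with
  | none => []
  | some top =>
      (top.1, "Médico") :: (scores.items.filter (fun kv => kv.1 != top.1)).map (fun kv => (kv.1, "Paciente"))

-- ===== PRECONDITION & SPEC =====
def Spec_label_speaker_roles (segments : List (List (String × String))) (out : List (String × String)) : Prop := out = label_speaker_roles_alt segments
instance (segments : List (List (String × String))) (out : List (String × String)) : Decidable (Spec_label_speaker_roles segments out) := by unfold Spec_label_speaker_roles; infer_instance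

-- ===== CLAIM (what is proved, stated in full; the proofs are below) =====
def Claim_equal_label_speaker_roles : Prop := ∀ (segments : List (List (String × String))), Dom_label_speaker_roles segments → Spec_label_speaker_roles segments (label_speaker_roles segments)

-- ===== LEMMAS AND PROOFS =====

-- the value correspondence between A's inner per-speaker dicts and B's triples
def pvPhi (p : String × (Int × Int × Int)) : String × PySem.Dict String Int :=
  (p.1, PySem.Dict.mk [("m", p.2.1), ("p", p.2.2.1), ("q", p.2.2.2)])

-- raw form of Dict.insert's overwrite on an items list
def pvRepl {α : Type} (l : List (String × α)) (k : String) (v : α) : List (String × α) :=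
  l.map (fun p => if p.1 == k then (k, v) else p)

theorem pv_find_map (l : List (String × (Int × Int × Int))) (k : String) :
    List.find? (fun p => p.1 == k) (l.map pvPhi) = (List.find? (fun p => p.1 == k) l).map pvPhi := by
  rw [List.find?_map]
  rfl

theorem pv_repl_map (l : List (String × (Int × Int × Int))) (k : String) (v : Int × Int × Int) :
    pvRepl (l.map pvPhi) k (pvPhi (k, v)).2 = (pvRepl l k v).map pvPhi := by
  simp only [pvRepl, List.map_map]
  apply List.map_congr_left
  intro p _
  by_cases h : p.1 = k <;> simp [pvPhi, Function.comp, h]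

theorem pv_find_repl {α : Type} (l : List (String × α)) (k : String) (v : α)
    (h : l.any (fun p => p.1 == k) = true) :
    List.find? (fun p => p.1 == k) (pvRepl l k v) = some (k, v) := by
  induction l with
  | nil => simp at h
  | cons x t ih =>
    by_cases hx : x.1 = k
    · simp [pvRepl, hx]
    · simp only [List.any_cons, Bool.or_eq_true] at h
      rcases h with h | h
      · exact absurd (by simpa using h) hx
      have hstep : pvRepl (x :: t) k v = x :: pvRepl t k v := by
        simp only [pvRepl, List.map_cons]
        rw [if_neg (by simp [hx])]
      rw [hstep, List.find?_cons_of_neg (by simp [hx])]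
      exact ih h

theorem pv_repl_repl {α : Type} (l : List (String × α)) (k : String) (v v' : α) :
    pvRepl (pvRepl l k v) k v' = pvRepl l k v' := by
  induction l with
  | nil => rfl
  | cons x t ih =>
    by_cases hx : x.1 = k <;> simp_all [pvRepl]

theorem pv_repl_id {α : Type} (l : List (String × α)) (k : String) (v : α)
    (h : l.any (fun p => p.1 == k) = false) : pvRepl l k v = l := by
  simp only [pvRepl]
  conv_rhs => rw [← List.map_id l]
  apply List.map_congr_left
  intro p hp
  rw [List.any_eq_false] at h
  rw [if_neg (by simpa using h p hp)]
  rfl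

theorem pv_insert_items_pos {ν : Type} (d : PySem.Dict String ν) (k : String) (v : ν)
    (h : d.contains k = true) : (d.insert k v).items = pvRepl d.items k v := by
  simp [PySem.Dict.insert, h, pvRepl]

theorem pv_insert_items_neg {ν : Type} (d : PySem.Dict String ν) (k : String) (v : ν)
    (h : d.contains k = false) : (d.insert k v).items = d.items ++ [(k, v)] := by
  simp [PySem.Dict.insert, h]

theorem pv_contains_of_find {ν : Type} (d : PySem.Dict String ν) (k : String) (pr : String × ν)
    (hpr : List.find? (fun p => p.1 == k) d.items = some pr) : d.contains k = true := by
  simp only [PySem.Dict.contains, List.any_eq_true]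
  exact ⟨pr, List.mem_of_find?_eq_some hpr, @List.find?_some _ (fun p => p.1 == k) pr d.items hpr⟩

theorem pv_modify_items_pos {ν : Type} (d : PySem.Dict String ν) (k : String) (dflt : ν)
    (f : ν → ν) (pr : String × ν)
    (hpr : List.find? (fun p => p.1 == k) d.items = some pr) :
    (d.modify k dflt f).items = pvRepl d.items k (f pr.2) := by
  rw [PySem.Dict.modify, PySem.Dict.getD, PySem.Dict.get?, hpr]
  exact pv_insert_items_pos _ _ _ (pv_contains_of_find d k pr hpr)

theorem pv_modify_items_neg {ν : Type} (d : PySem.Dict String ν) (k : String) (dflt : ν)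
    (f : ν → ν) (hpr : List.find? (fun p => p.1 == k) d.items = none) :
    (d.modify k dflt f).items = d.items ++ [(k, f dflt)] := by
  rw [PySem.Dict.modify, PySem.Dict.getD, PySem.Dict.get?, hpr]
  apply pv_insert_items_neg
  simp only [PySem.Dict.contains]
  rw [List.any_eq_false]
  intro x hx
  exact List.find?_eq_none.mp hpr x hx

theorem pv_step_rel (dA : PySem.Dict String (PySem.Dict String Int))
    (dB : PySem.Dict String (Int × Int × Int)) (s : List (String × String))
    (h : dA.items = dB.items.map pvPhi) :
    (pvStepA dA s).items = (pvStepB dB s).items.map pvPhi := by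
  simp only [pvStepA, pvStepB]
  generalize (PySem.Dict.mk s).getD "speaker" "UNKNOWN" = spk
  generalize (PySem.Dict.mk s).getD "text" "" = txt
  generalize pvScoreText txt pvMedicoCues = m
  generalize pvScoreText txt pvPacienteCues = p
  generalize (if PySem.Str.endswith txt "?" then (1 : Int) else 0) = q
  cases hf : List.find? (fun pr => pr.1 == spk) dB.items with
  | none =>
    have hfA : List.find? (fun pr => pr.1 == spk) dA.items = none := by
      rw [h, pv_find_map, hf]; rfl
    have hcA : dA.contains spk = false := by
      simp only [PySem.Dict.contains]
      rw [List.any_eq_false]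
      intro x hx
      exact List.find?_eq_none.mp hfA x hx
    have hanyA : (dA.items.any fun pr => pr.1 == spk) = false := by
      simpa [PySem.Dict.contains] using hcA
    have e1 : dA.setdefault spk (PySem.Dict.ofList [("m", 0), ("p", 0), ("q", 0)])
        = PySem.Dict.mk (dA.items ++ [(spk, pvInner0)]) := by
      apply PySem.Dict.ext
      rw [PySem.Dict.setdefault, if_neg (by simp [hcA])]
      rfl
    have hfind : ∀ (x : PySem.Dict String Int),
        List.find? (fun pr => pr.1 == spk) (dA.items ++ [(spk, x)]) = some (spk, x) := by
      intro x
      rw [List.find?_append, hfA]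
      simp
    have hrepl : ∀ (x v : PySem.Dict String Int),
        pvRepl (dA.items ++ [(spk, x)]) spk v = dA.items ++ [(spk, v)] := by
      intro x v
      have h2 : pvRepl [(spk, x)] spk v = [(spk, v)] := by simp [pvRepl]
      calc pvRepl (dA.items ++ [(spk, x)]) spk v
          = pvRepl dA.items spk v ++ pvRepl [(spk, x)] spk v := List.map_append ..
        _ = dA.items ++ [(spk, v)] := by rw [pv_repl_id _ _ _ hanyA, h2]
    have e2 : ∀ (d : PySem.Dict String (PySem.Dict String Int)) (x : PySem.Dict String Int)
        (f : PySem.Dict String Int → PySem.Dict String Int),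
        d = PySem.Dict.mk (dA.items ++ [(spk, x)]) →
        d.modify spk pvInner0 f = PySem.Dict.mk (dA.items ++ [(spk, f x)]) := by
      intro d x f hd
      subst hd
      apply PySem.Dict.ext
      rw [pv_modify_items_pos _ _ _ _ _ (hfind x)]
      exact hrepl x _
    rw [e1, e2 _ _ _ rfl, e2 _ _ _ rfl, e2 _ _ _ rfl]
    have eB : (dB.modify spk (0, 0, 0) fun t =>
        (t.1 + m, t.2.1 + p, t.2.2 + q)).items = dB.items ++ [(spk, (0 + m, 0 + p, 0 + q))] :=
      pv_modify_items_neg dB spk (0, 0, 0) _ hf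
    rw [eB, List.map_append, ← h]
    rfl
  | some pr =>
    have hfA : List.find? (fun x => x.1 == spk) dA.items = some (pvPhi pr) := by
      rw [h, pv_find_map, hf]; rfl
    have hcA : dA.contains spk = true := pv_contains_of_find dA spk (pvPhi pr) hfA
    have hanyA : (dA.items.any fun x => x.1 == spk) = true := by
      simpa [PySem.Dict.contains] using hcA
    have e1 : dA.setdefault spk (PySem.Dict.ofList [("m", 0), ("p", 0), ("q", 0)]) = dA :=
      PySem.Dict.setdefault_of_contains dA _ hcA
    have e2 : dA.modify spk pvInner0 (fun r => r.modify "m" 0 (· + m))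
        = PySem.Dict.mk (pvRepl dA.items spk ((pvPhi pr).2.modify "m" 0 (· + m))) :=
      PySem.Dict.ext (pv_modify_items_pos _ _ _ _ _ hfA)
    have e3 : ∀ (v : PySem.Dict String Int) (f : PySem.Dict String Int → PySem.Dict String Int),
        (PySem.Dict.mk (pvRepl dA.items spk v)).modify spk pvInner0 f
          = PySem.Dict.mk (pvRepl dA.items spk (f v)) := by
      intro v f
      apply PySem.Dict.ext
      exact (pv_modify_items_pos (PySem.Dict.mk (pvRepl dA.items spk v)) spk pvInner0 f
        (spk, v) (pv_find_repl dA.items spk v hanyA)).trans (pv_repl_repl dA.items spk v (f v))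
    rw [e1, e2, e3, e3]
    have eB : (dB.modify spk (0, 0, 0) fun t =>
        (t.1 + m, t.2.1 + p, t.2.2 + q)).items
        = pvRepl dB.items spk (pr.2.1 + m, pr.2.2.1 + p, pr.2.2.2 + q) :=
      pv_modify_items_pos dB spk (0, 0, 0) _ pr hf
    rw [eB, ← pv_repl_map, ← h]
    rfl

theorem pv_agg_rel (segments : List (List (String × String)))
    (dA : PySem.Dict String (PySem.Dict String Int))
    (dB : PySem.Dict String (Int × Int × Int))
    (h : dA.items = dB.items.map pvPhi) :
    (segments.foldl pvStepA dA).items = (segments.foldl pvStepB dB).items.map pvPhi := by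
  induction segments generalizing dA dB with
  | nil => exact h
  | cons s t ih => exact ih _ _ (pv_step_rel dA dB s h)

theorem pv_head_insertBy_one {α : Type} (before : α → α → Bool) (x : α) (l : List α) :
    (PySem.List.insertBy before x l).head? = (match l.head? with
      | none => some x
      | some y => if before x y then some x else some y) := by
  cases l with
  | nil => rfl
  | cons y ys =>
    by_cases hb : before x y = true
    · simp [PySem.List.insertBy, hb]
    · simp [PySem.List.insertBy, hb]

theorem pv_head_insertBy {α : Type} (before : α → α → Bool) (xs : List α) (acc : List α) :
    (xs.foldl (fun a x => PySem.List.insertBy before x a) acc).head? =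
      xs.foldl (fun o x => match o with
        | none => some x
        | some m => if before x m then some x else some m) acc.head? := by
  induction xs generalizing acc with
  | nil => rfl
  | cons x t ih =>
    simp only [List.foldl_cons]
    rw [ih, pv_head_insertBy_one]

theorem pv_head_sorted2_rev {α : Type} (xs : List α) (k1 k2 : α → Int) :
    (PySem.List.sorted2 xs k1 k2 true).head? = PySem.List.max2? xs k1 k2 := by
  exact pv_head_insertBy
    (fun a b => decide (k1 b < k1 a) || (!decide (k1 a < k1 b) && decide (k2 b < k2 a))) xs []

theorem pv_max2_map {α β : Type} (φ : α → β) (l : List α)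
    (kA1 kA2 : β → Int) (kB1 kB2 : α → Int)
    (h1 : ∀ p, kA1 (φ p) = kB1 p) (h2 : ∀ p, kA2 (φ p) = kB2 p) :
    PySem.List.max2? (l.map φ) kA1 kA2 = (PySem.List.max2? l kB1 kB2).map φ := by
  simp only [PySem.List.max2?, List.foldl_map]
  have key : ∀ (o : Option α),
      l.foldl (fun acc x => match acc with
        | none => some (φ x)
        | some m => if (decide (kA1 m < kA1 (φ x)) || (!decide (kA1 (φ x) < kA1 m) && decide (kA2 m < kA2 (φ x)))) = true
            then some (φ x) else some m) (o.map φ) =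
      (l.foldl (fun acc x => match acc with
        | none => some x
        | some m => if (decide (kB1 m < kB1 x) || (!decide (kB1 x < kB1 m) && decide (kB2 m < kB2 x))) = true
            then some x else some m) o).map φ := by
    intro o
    induction l generalizing o with
    | nil => rfl
    | cons x t ih =>
      simp only [List.foldl_cons]
      cases o with
      | none => exact ih (some x)
      | some m =>
        rw [← ih]
        congr 1
        simp only [Option.map_some, h1, h2]
        split_ifs <;> rfl
  exact key none

theorem pv_max2_none {α : Type} (l : List α) (k1 k2 : α → Int)
    (h : PySem.List.max2? l k1 k2 = none) : l = [] := by
  cases l with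
  | nil => rfl
  | cons x t =>
    exfalso
    have aux : ∀ (t : List α) (m : α),
        t.foldl (fun acc x => match acc with
          | none => some x
          | some m => if (decide (k1 m < k1 x) || (!decide (k1 x < k1 m) && decide (k2 m < k2 x))) = true
              then some x else some m) (some m) ≠ none := by
      intro t
      induction t with
      | nil => intro m hm; simp at hm
      | cons y ys ih =>
        intro m
        simp only [List.foldl_cons]
        split_ifs <;> exact ih _
    exact aux t x (by simpa [PySem.List.max2?] using h)

theorem pv_setdefault_fold (l : List (String × PySem.Dict String Int)) (M : PySem.Dict String String)
    (hn : l.Pairwise (fun a b => a.1 ≠ b.1)) (v : String) :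
    (l.foldl (fun mp kv => mp.setdefault kv.1 v) M).items =
      M.items ++ (l.filter (fun kv => !M.contains kv.1)).map (fun kv => (kv.1, v)) := by
  induction l generalizing M with
  | nil => simp
  | cons x t ih =>
    rcases List.pairwise_cons.mp hn with ⟨hx, ht⟩
    simp only [List.foldl_cons, List.filter_cons]
    by_cases hc : M.contains x.1 = true
    · rw [PySem.Dict.setdefault_of_contains M v hc, ih M ht, hc]
      rfl
    · rw [PySem.Dict.setdefault_of_not_contains M v (by simpa using hc)]
      rw [ih _ ht]
      have hcontains : ∀ y ∈ t, (M.insert x.1 v).contains y.1 = M.contains y.1 := by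
        intro y hy
        rw [PySem.Dict.contains_insert]
        have hne : (y.1 == x.1) = false := by simpa using (hx y hy).symm
        simp [hne, PySem.Dict.contains]
      rw [List.filter_congr (fun y hy => by rw [hcontains y hy])]
      have hins : (M.insert x.1 v).items = M.items ++ [(x.1, v)] := by
        rw [PySem.Dict.insert, if_neg (by simp [hc])]
      rw [hins]
      simp [hc]

-- ===== VERDICT (by name: the statement is the Claim_ definition above) =====
theorem label_speaker_roles_spec : Claim_equal_label_speaker_roles := by
  intro segments _
  unfold Spec_label_speaker_roles
  simp only [label_speaker_roles, label_speaker_roles_alt]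
  have hrel : (segments.foldl pvStepA PySem.Dict.empty).items
      = (segments.foldl pvStepB PySem.Dict.empty).items.map pvPhi :=
    pv_agg_rel segments _ _ rfl
  have hnodup : (segments.foldl pvStepB PySem.Dict.empty).keys.Nodup :=
    PySem.Dict.nodup_keys_foldl_modify_key segments
      (fun s => (PySem.Dict.mk s).getD "speaker" "UNKNOWN") (0, 0, 0)
      (fun _ s t => (t.1 + pvScoreText ((PySem.Dict.mk s).getD "text" "") pvMedicoCues,
        t.2.1 + pvScoreText ((PySem.Dict.mk s).getD "text" "") pvPacienteCues,
        t.2.2 + (if PySem.Str.endswith ((PySem.Dict.mk s).getD "text" "") "?" then 1 else 0)))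
      PySem.Dict.empty (by simp [PySem.Dict.empty, PySem.Dict.keys])
  have hpw : (segments.foldl pvStepB PySem.Dict.empty).items.Pairwise (fun a b => a.1 ≠ b.1) := by
    have hk : (segments.foldl pvStepB PySem.Dict.empty).keys
        = (segments.foldl pvStepB PySem.Dict.empty).items.map Prod.fst := rfl
    rw [hk, List.nodup_iff_pairwise_ne, List.pairwise_map] at hnodup
    exact hnodup
  rw [hrel, pv_head_sorted2_rev,
    pv_max2_map pvPhi _ _ _ (fun kv => kv.2.1 - kv.2.2.1) (fun kv => kv.2.2.2)
      (fun p => rfl) (fun p => rfl)]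
  cases hmax : PySem.List.max2? (segments.foldl pvStepB PySem.Dict.empty).items
      (fun kv => kv.2.1 - kv.2.2.1) (fun kv => kv.2.2.2) with
  | none =>
    rw [pv_max2_none _ _ _ hmax]
    rfl
  | some top =>
    simp only [Option.map_some]
    have hM : PySem.Dict.empty.insert (pvPhi top).1 "Médico"
        = PySem.Dict.mk [(top.1, "Médico")] := rfl
    rw [hM, pv_setdefault_fold _ _ (List.pairwise_map.mpr hpw) _, List.filter_map, List.map_map]
    have hfilter : ∀ kv ∈ (segments.foldl pvStepB PySem.Dict.empty).items,
        ((fun p => !(PySem.Dict.mk [(top.1, "Médico")]).contains p.1) ∘ pvPhi) kv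
          = (kv.1 != top.1) := by
      intro kv _
      simp [PySem.Dict.contains, pvPhi, bne, Function.comp, eq_comm]
    rw [List.filter_congr hfilter]
    rfl
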